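-- pv_equiv track=rewrite | github.com/yujeong23/algorithm | programmers/level1/92334_신고결과받기.py | solution
-- ===== SOURCE A (Python) =====
-- def solution(id_list, report, k):
--     answer = [0] * len(id_list)
--     reports = {id: set() for id in id_list}
--     reported_by = {id: set() for id in id_list}
--
--     for names in report:
--         a, b = map(str, names.split())
--         reports[a].add(b)
--         reported_by[b].add(a)
--
--     for idx, id in enumerate(id_list):
--         for person in reports[id]:
--             if len(reported_by[person]) >= k:
--                 answer[idx] += 1
--
--     return answer
-- ===== SOURCE B (Python) =====
-- def solution(id_list, report, k):
--     # Dedup the report lines into an ordered list of (reporter, reported) pairs,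
--     # then answer by direct nested counting over that flat list: no dicts, no sets.
--     seen = []
--     for r in report:
--         a, b = r.split()
--         if (a, b) not in seen:
--             seen.append((a, b))
--     return [sum(1 for (a, b) in seen
--                 if a == i and sum(1 for (c, d) in seen if d == b) >= k)
--             for i in id_list]
-- ===== Notes on version B (the rewrite author's own statement) =====
-- stated objective: alternative
-- what changed: Replaces A's per-id dictionaries of reporter sets and nested per-id traversal by one flat ordered dedup list of (reporter, reported) pairs, answering each id by direct nested counting comprehensions over that list (no dicts or sets at all).
import Mathlib
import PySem

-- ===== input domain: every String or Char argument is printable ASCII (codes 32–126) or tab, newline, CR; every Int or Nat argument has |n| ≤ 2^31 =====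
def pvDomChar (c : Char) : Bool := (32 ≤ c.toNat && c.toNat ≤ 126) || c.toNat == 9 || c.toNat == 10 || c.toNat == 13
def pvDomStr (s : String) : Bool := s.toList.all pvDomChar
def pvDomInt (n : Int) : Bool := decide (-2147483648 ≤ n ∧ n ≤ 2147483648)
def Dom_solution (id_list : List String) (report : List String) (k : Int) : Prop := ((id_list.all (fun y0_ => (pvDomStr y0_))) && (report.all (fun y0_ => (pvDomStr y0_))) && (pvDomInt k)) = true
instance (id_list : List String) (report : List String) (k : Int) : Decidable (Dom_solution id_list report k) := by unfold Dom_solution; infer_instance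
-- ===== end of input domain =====

-- B replaces A's per-id dictionaries of reporter-sets and nested per-id traversal by one flat
-- ordered dedup list of (reporter, reported) pairs, answered by nested counting over that list
-- (objective: alternative; not faster).

-- "a, b = r.split()" — some (a, b) iff the split has exactly two tokens (else Python raises ValueError; outside Pre_)
def parse2 (r : String) : Option (String × String) :=
  match PySem.Str.split₀ r with
  | [a, b] => some (a, b)
  | _ => none

-- ===== PORT A =====
def solution (id_list : List String) (report : List String) (k : Int) : List Int :=
  let answer : List Int := PySem.List.pyRepeat [(0 : Int)] (id_list.length : Int)
  let reports0 : PySem.Dict String (PySem.Set String) :=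
    id_list.foldl (fun d id => d.insert id PySem.Set.empty) PySem.Dict.empty
  let reported_by0 : PySem.Dict String (PySem.Set String) :=
    id_list.foldl (fun d id => d.insert id PySem.Set.empty) PySem.Dict.empty
  let st := report.foldl (fun st names =>
    match parse2 names with
    | some p =>
      (match st.1.get? p.1 with
       | some sa => st.1.insert p.1 (PySem.Set.add sa p.2)
       | none => st.1,                                      -- Python: KeyError (outside Pre_)
       match st.2.get? p.2 with
       | some sb => st.2.insert p.2 (PySem.Set.add sb p.1)
       | none => st.2)                                      -- Python: KeyError (outside Pre_)
    | none => st) (reports0, reported_by0)                  -- Python: ValueError (outside Pre_)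
  (PySem.List.enumerate id_list).foldl (fun ans p =>
    (st.1.getD p.2 PySem.Set.empty).foldl (fun ans person =>
      if k ≤ ((st.2.getD person PySem.Set.empty).length : Int) then
        ans.set p.1.toNat (ans.getD p.1.toNat 0 + 1)        -- answer[idx] += 1 (idx always in range)
      else ans) ans) answer

-- ===== PORT B =====
def solution_alt (id_list : List String) (report : List String) (k : Int) : List Int :=
  let seen : List (String × String) := report.foldl (fun seen r =>
    match parse2 r with
    | some p => if p ∈ seen then seen else seen ++ [p]      -- Python: ValueError (outside Pre_)
    | none => seen) []
  id_list.map (fun i =>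
    ((seen.countP (fun p => p.1 == i &&
        decide (k ≤ ((seen.countP (fun q => q.2 == p.2)) : Int)))) : Int))

-- ===== PRECONDITION & SPEC =====
-- Pre_ excludes exactly the inputs on which A raises: a report line whose split is not two tokens
-- (ValueError on unpacking) or that mentions a name outside id_list (KeyError).
def Pre_solution (id_list : List String) (report : List String) (k : Int) : Prop :=
  ∀ r ∈ report, (PySem.Str.split₀ r).length = 2 ∧ ∀ t ∈ PySem.Str.split₀ r, t ∈ id_list
instance (id_list : List String) (report : List String) (k : Int) : Decidable (Pre_solution id_list report k) := by unfold Pre_solution; infer_instance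
def pvWitness_solution : List String × List String × Int := (["muzi", "frodo", "neo"], ["muzi frodo", "neo muzi", "muzi frodo"], 1)
def Spec_solution (id_list : List String) (report : List String) (k : Int) (out : List Int) : Prop := out = solution_alt id_list report k
instance (id_list : List String) (report : List String) (k : Int) (out : List Int) : Decidable (Spec_solution id_list report k out) := by unfold Spec_solution; infer_instance

-- ===== CLAIM (what is proved, stated in full; the proofs are below) =====
def Claim_equal_solution : Prop := ∀ (id_list : List String) (report : List String) (k : Int), Dom_solution id_list report k → Pre_solution id_list report k → Spec_solution id_list report k (solution id_list report k)

-- ===== LEMMAS AND PROOFS =====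

lemma parse2_eq_some {r : String} {p : String × String} (h : parse2 r = some p) :
    PySem.Str.split₀ r = [p.1, p.2] := by
  unfold parse2 at h
  cases hs : PySem.Str.split₀ r with
  | nil => rw [hs] at h; simp at h
  | cons a t =>
    cases t with
    | nil => rw [hs] at h; simp at h
    | cons b t' =>
      cases t' with
      | nil => rw [hs] at h; simp at h; rw [← h]
      | cons c t'' => rw [hs] at h; simp at h

lemma split2_exists {r : String} (h : (PySem.Str.split₀ r).length = 2) :
    ∃ a b, PySem.Str.split₀ r = [a, b] ∧ parse2 r = some (a, b) := by
  cases hs : PySem.Str.split₀ r with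
  | nil => rw [hs] at h; simp at h
  | cons a t =>
    cases t with
    | nil => rw [hs] at h; simp at h
    | cons b t' =>
      cases t' with
      | nil => exact ⟨a, b, rfl, by simp [parse2, hs]⟩
      | cons c t'' => rw [hs] at h; simp at h

-- the initial dicts {id: set() for id in id_list}
lemma init_get? (ids : List String) (d : PySem.Dict String (PySem.Set String)) (x : String) :
    (ids.foldl (fun d id => d.insert id PySem.Set.empty) d).get? x
      = if x ∈ ids then some PySem.Set.empty else d.get? x := by
  induction ids generalizing d with
  | nil => simp
  | cons i rest ih =>
    simp only [List.foldl_cons, ih, List.mem_cons]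
    by_cases hx : x ∈ rest
    · simp [hx]
    · by_cases hxi : x = i
      · subst hxi; simp [hx, PySem.Dict.get?_insert_self]
      · simp [hx, hxi, PySem.Dict.get?_insert_of_ne _ _ hxi]

-- one report-processing dict fold (either side of A's pair of dicts, abstracted over which
-- component of the parsed pair is the key)
def stepA (kf vf : String × String → String) (d : PySem.Dict String (PySem.Set String)) (r : String) :
    PySem.Dict String (PySem.Set String) :=
  match parse2 r with
  | some p =>
    match d.get? (kf p) with
    | some s => d.insert (kf p) (PySem.Set.add s (vf p))
    | none => d
  | none => d

lemma buildDict (kf vf : String × String → String) (rs : List String)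
    (d : PySem.Dict String (PySem.Set String))
    (h : ∀ r ∈ rs, ∃ p, parse2 r = some p ∧ d.contains (kf p) = true) (x : String) :
    (rs.foldl (stepA kf vf) d).get? x
      = (d.get? x).map (fun s =>
          PySem.Set.update s (((rs.filterMap parse2).filter (fun p => kf p == x)).map vf)) := by
  induction rs generalizing d with
  | nil => cases h' : d.get? x <;> simp [h', PySem.Set.update]
  | cons r rest ih =>
    obtain ⟨p, hp, hc⟩ := h r (by simp)
    rw [PySem.Dict.contains_eq_isSome_get?] at hc
    obtain ⟨s, hs⟩ := Option.isSome_iff_exists.mp hc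
    have hstep : stepA kf vf d r = d.insert (kf p) (PySem.Set.add s (vf p)) := by
      simp [stepA, hp, hs]
    have hpre' : ∀ r' ∈ rest, ∃ q, parse2 r' = some q ∧
        (d.insert (kf p) (PySem.Set.add s (vf p))).contains (kf q) = true := by
      intro r' hr'
      obtain ⟨q, hq, hcq⟩ := h r' (by simp [hr'])
      exact ⟨q, hq, by simp [PySem.Dict.contains_insert, hcq]⟩
    rw [List.foldl_cons, hstep, ih _ hpre']
    simp only [List.filterMap_cons, hp]
    by_cases hx : kf p = x
    · subst hx
      rw [PySem.Dict.get?_insert_self, hs]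
      simp [PySem.Set.update]
    · rw [PySem.Dict.get?_insert_of_ne _ _ (fun h' => hx h'.symm)]
      simp [hx]

lemma setOfListConcat {α : Type} [BEq α] (M : List α) (v : α) :
    PySem.Set.ofList (M ++ [v]) = PySem.Set.add (PySem.Set.ofList M) v := by
  simp [List.foldl_append, PySem.Set.ofList]

-- first-occurrence order of values keyed to x agrees between "dedup after projecting" and
-- "project after dedup"
lemma setProj (kf vf : String × String → String)
    (hinj : ∀ p q : String × String, kf p = kf q → vf p = vf q → p = q)
    (L : List (String × String)) (x : String) :
    PySem.Set.ofList ((L.filter (fun p => kf p == x)).map vf)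
      = ((PySem.Set.ofList L).filter (fun p => kf p == x)).map vf := by
  induction L using List.reverseRecOn with
  | nil => simp
  | append_singleton L p ih =>
    by_cases hx : kf p = x
    · have hL : ((L ++ [p]).filter (fun q => kf q == x)).map vf
              = (L.filter (fun q => kf q == x)).map vf ++ [vf p] := by simp [hx]
      rw [hL, setOfListConcat, ih, setOfListConcat]
      by_cases hmem : p ∈ PySem.Set.ofList L
      · rw [PySem.Set.add_of_mem hmem,
          PySem.Set.add_of_mem (List.mem_map_of_mem (List.mem_filter.mpr ⟨hmem, by simp [hx]⟩))]
      · have hv : vf p ∉ ((PySem.Set.ofList L).filter (fun q => kf q == x)).map vf := by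
          intro hv
          obtain ⟨q, hqf, hqv⟩ := List.mem_map.mp hv
          obtain ⟨hqS, hqx⟩ := List.mem_filter.mp hqf
          have hq : kf q = x := by simpa using hqx
          exact hmem ((hinj q p (hq.trans hx.symm) hqv) ▸ hqS)
        rw [PySem.Set.add_of_not_mem hmem, PySem.Set.add_of_not_mem hv]
        simp [hx]
    · have hL : (L ++ [p]).filter (fun q => kf q == x) = L.filter (fun q => kf q == x) := by
        simp [hx]
      rw [hL, ih, setOfListConcat]
      by_cases hmem : p ∈ PySem.Set.ofList L
      · rw [PySem.Set.add_of_mem hmem]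
      · rw [PySem.Set.add_of_not_mem hmem]; simp [hx]

-- B's dedup loop builds exactly set(filterMap parse2 report) as an ordered list
lemma seenEq (rs : List String) (acc : List (String × String)) :
    rs.foldl (fun seen r => match parse2 r with
      | some p => if p ∈ seen then seen else seen ++ [p]
      | none => seen) acc
    = PySem.Set.update acc (rs.filterMap parse2) := by
  induction rs generalizing acc with
  | nil => simp [PySem.Set.update]
  | cons r rest ih =>
    cases hp : parse2 r with
    | none => simp [hp, ih, PySem.Set.update]
    | some p =>
      simp only [List.foldl_cons, hp, ih, List.filterMap_cons, PySem.Set.update,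
        List.foldl_cons]
      by_cases hm : p ∈ acc
      · rw [if_pos hm, PySem.Set.add_of_mem hm]
      · rw [if_neg hm, PySem.Set.add_of_not_mem hm]

-- inner loop of A's answer pass: all increments hit the same index
lemma innerFold (c : String → Prop) [DecidablePred c] (l : List String) :
    ∀ (ans : List Int) (i : Nat), i < ans.length →
    l.foldl (fun ans x => if c x then ans.set i (ans.getD i 0 + 1) else ans) ans
      = ans.set i (ans.getD i 0 + (l.countP (fun x => decide (c x)) : Int)) := by
  induction l with
  | nil =>
    intro ans i h
    rw [List.foldl_nil, List.countP_nil]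
    rw [List.getD_eq_getElem ans 0 h]
    simp [List.set_getElem_self h]
  | cons x l ih =>
    intro ans i h
    rw [List.foldl_cons, List.countP_cons]
    by_cases hc : c x
    · rw [if_pos hc, ih _ i (by simpa using h)]
      rw [List.set_set]
      have : (ans.set i (ans.getD i 0 + 1)).getD i 0 = ans.getD i 0 + 1 := by
        rw [List.getD_eq_getElem _ 0 (by simpa using h)]
        simp [List.getElem_set_self, h]
      rw [this]
      simp [hc]
      ring_nf
    · rw [if_neg hc, ih _ i h]
      simp [hc]

-- outer loop of A's answer pass: enumerate + per-index increments fill the zero suffix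
lemma outerFold (f : String → List String) (c : String → Prop) [DecidablePred c] :
    ∀ (xs : List String) (pre : List Int),
    (PySem.List.enumerate xs (pre.length : Int)).foldl
      (fun ans p => (f p.2).foldl
        (fun ans person => if c person then ans.set p.1.toNat (ans.getD p.1.toNat 0 + 1) else ans) ans)
      (pre ++ List.replicate xs.length 0)
    = pre ++ xs.map (fun id => ((f id).countP (fun x => decide (c x)) : Int)) := by
  intro xs
  induction xs with
  | nil => intro pre; simp
  | cons x xs ih =>
    intro pre
    rw [List.length_cons, List.replicate_succ, PySem.List.enumerate_cons, List.foldl_cons]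
    have hlen : (pre.length : Int).toNat = pre.length := Int.toNat_natCast _
    have hstep : (f x).foldl
        (fun ans person => if c person then
          ans.set ((pre.length : Int)).toNat (ans.getD ((pre.length : Int)).toNat 0 + 1) else ans)
        (pre ++ 0 :: List.replicate xs.length 0)
      = pre ++ ((f x).countP (fun y => decide (c y)) : Int) :: List.replicate xs.length 0 := by
      rw [innerFold c (f x) _ _ (by simp [hlen])]
      rw [hlen]
      have h0 : (pre ++ 0 :: List.replicate xs.length 0).getD pre.length 0 = 0 := by
        simp [List.getD_eq_getElem?_getD]
      rw [h0]
      have : (pre ++ 0 :: List.replicate xs.length 0).set pre.length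
          (0 + ((f x).countP (fun y => decide (c y)) : Int))
          = pre ++ (0 + ((f x).countP (fun y => decide (c y)) : Int)) :: List.replicate xs.length 0 := by
        simp
      rw [this]
      ring_nf
    rw [hstep]
    have hre : pre ++ ((f x).countP (fun y => decide (c y)) : Int) :: List.replicate xs.length 0
        = (pre ++ [((f x).countP (fun y => decide (c y)) : Int)]) ++ List.replicate xs.length 0 := by
      simp
    have hidx : (pre.length : Int) + 1 = ((pre ++ [((f x).countP (fun y => decide (c y)) : Int)]).length : Int) := by
      simp
    rw [hre, hidx, ih]
    simp

-- ===== VERDICT (by name: the statement is the Claim_ definition above) =====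
theorem solution_spec : Claim_equal_solution := by
  intro id_list report k _ hpre
  unfold Spec_solution solution solution_alt
  simp only []
  -- the initial dict
  generalize hd0 : (id_list.foldl (fun d id => d.insert id PySem.Set.empty) PySem.Dict.empty
      : PySem.Dict String (PySem.Set String)) = d0
  -- 1. split A's pair fold into two independent dict folds
  have hsplit : report.foldl (fun st names =>
      match parse2 names with
      | some p =>
        (match st.1.get? p.1 with
         | some sa => st.1.insert p.1 (PySem.Set.add sa p.2)
         | none => st.1,
         match st.2.get? p.2 with
         | some sb => st.2.insert p.2 (PySem.Set.add sb p.1)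
         | none => st.2)
      | none => st) (d0, d0)
      = (report.foldl (stepA Prod.fst Prod.snd) d0, report.foldl (stepA Prod.snd Prod.fst) d0) := by
    have hs1 := PySem.List.foldl_congr_mem (l := report) (init := (d0, d0))
      (f := fun st names =>
        match parse2 names with
        | some p =>
          (match Prod.fst st |>.get? p.1 with
           | some sa => st.1.insert p.1 (PySem.Set.add sa p.2)
           | none => st.1,
           match st.2.get? p.2 with
           | some sb => st.2.insert p.2 (PySem.Set.add sb p.1)
           | none => st.2)
        | none => st)
      (g := fun st r => (stepA Prod.fst Prod.snd st.1 r, stepA Prod.snd Prod.fst st.2 r))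
      (by intro acc x hx; cases hp : parse2 x <;> simp [stepA, hp])
    have hs2 := PySem.List.foldl_prod_mk (f := stepA Prod.fst Prod.snd)
      (g := stepA Prod.snd Prod.fst) (l := report) (a := d0) (b := d0)
    exact hs1.trans hs2
  rw [hsplit]
  -- 2. names in report lines are all keys of d0
  have hkey : ∀ x, x ∈ id_list → d0.contains x = true := by
    intro x hx
    rw [PySem.Dict.contains_eq_isSome_get?, ← hd0, init_get?]
    simp [hx]
  have hmem2 : ∀ r ∈ report, ∃ p : String × String, parse2 r = some p ∧
      p.1 ∈ id_list ∧ p.2 ∈ id_list := by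
    intro r hr
    obtain ⟨h2, hin⟩ := hpre r hr
    obtain ⟨a, b, hab, hp⟩ := split2_exists h2
    exact ⟨(a, b), hp, hin a (by simp [hab]), hin b (by simp [hab])⟩
  -- 3. the two dicts after the report loop
  have hget : ∀ (kf vf : String × String → String),
      (∀ r ∈ report, ∃ p, parse2 r = some p ∧ kf p ∈ id_list ∧ vf p ∈ id_list) →
      ∀ x ∈ id_list, (report.foldl (stepA kf vf) d0).getD x PySem.Set.empty
        = PySem.Set.ofList (((report.filterMap parse2).filter (fun p => kf p == x)).map vf) := by
    intro kf vf hkv x hx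
    rw [PySem.Dict.getD_eq_get?_getD, buildDict kf vf report d0
      (fun r hr => by obtain ⟨p, hp, h1, _⟩ := hkv r hr; exact ⟨p, hp, hkey _ h1⟩) x]
    rw [← hd0, init_get?]
    simp only [hx, if_pos]
    rfl
  have hget1 := hget Prod.fst Prod.snd (fun r hr => hmem2 r hr)
  have hget2 := hget Prod.snd Prod.fst (fun r hr => by
    obtain ⟨p, hp, h1, h2⟩ := hmem2 r hr; exact ⟨p, hp, h2, h1⟩)
  -- 4. A's answer pass is a per-id count
  have hrep : PySem.List.pyRepeat [(0 : Int)] (id_list.length : Int)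
      = List.replicate id_list.length 0 := by
    simp [PySem.List.pyRepeat_singleton]
  rw [hrep]
  have houter := outerFold
    (fun id => (report.foldl (stepA Prod.fst Prod.snd) d0).getD id PySem.Set.empty)
    (fun person => k ≤
      (((report.foldl (stepA Prod.snd Prod.fst) d0).getD person PySem.Set.empty).length : Int))
    id_list []
  simp only [List.length_nil, Nat.cast_zero, List.nil_append] at houter
  rw [houter]
  -- 5. B's dedup list is set(filterMap parse2 report)
  rw [seenEq report []]
  have hup : PySem.Set.update ([] : List (String × String)) (report.filterMap parse2)
      = PySem.Set.ofList (report.filterMap parse2) := rfl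
  rw [hup]
  -- 6. pointwise equality of the two per-id counts
  refine List.map_congr_left ?_
  intro id hid
  have hmemS : ∀ p ∈ PySem.Set.ofList (report.filterMap parse2),
      p.1 ∈ id_list ∧ p.2 ∈ id_list := by
    intro p hp
    rw [PySem.Set.mem_ofList] at hp
    obtain ⟨r, hr, hpr⟩ := List.mem_filterMap.mp hp
    obtain ⟨h2, hin⟩ := hpre r hr
    have hsp := parse2_eq_some hpr
    exact ⟨hin _ (by simp [hsp]), hin _ (by simp [hsp])⟩
  have hinj1 : ∀ p q : String × String, p.1 = q.1 → p.2 = q.2 → p = q :=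
    fun p q h1 h2 => Prod.ext h1 h2
  have hinj2 : ∀ p q : String × String, p.2 = q.2 → p.1 = q.1 → p = q :=
    fun p q h2 h1 => Prod.ext h1 h2
  rw [hget1 id hid, setProj Prod.fst Prod.snd hinj1]
  rw [List.countP_map, List.countP_filter]
  have hpred : ∀ p ∈ (PySem.Set.ofList (report.filterMap parse2) : List (String × String)),
      (((fun x => decide (k ≤ ((List.length ((List.foldl (stepA Prod.snd Prod.fst) d0 report).getD x
          PySem.Set.empty)) : Int))) ∘ Prod.snd) p && (p.1 == id))
      = ((p.1 == id) && decide (k ≤ (((PySem.Set.ofList (report.filterMap parse2)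
          : List (String × String)).countP (fun q => q.2 == p.2)) : Int))) := by
    intro p hp
    obtain ⟨h1, h2⟩ := hmemS p hp
    rw [Function.comp_apply, hget2 p.2 h2, setProj Prod.snd Prod.fst hinj2]
    rw [List.length_map, ← List.countP_eq_length_filter]
    exact Bool.and_comm _ _
  exact congrArg _ (List.countP_congr (fun p hp => by rw [hpred p hp]))
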